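-- pv_equiv track=rewrite | github.com/mandali8686/commit-tracking | file_evaluator.py | extract_mentioned_files
-- ===== SOURCE A (Python) =====
-- def extract_mentioned_files(message_results, ground_truth_files):
--     extracted_files = {}
--     for row_key, prompts in message_results.items():
--         # Initialize an empty list for each row in the output
--         extracted_files[row_key] = []
--         if row_key in ground_truth_files:
--             # Get the list of files to check from the ground truth
--             truth_files = ground_truth_files[row_key]
--             # Iterate through each prompt in the row
--             for prompt_key, prompt_data in prompts.items():
--                 # Focus on the 'message_query' content
--                 if 'message_query' in prompt_data:
--                     message_text = prompt_data['message_query']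
--                     # Check each ground truth file against the message
--                     for file in truth_files:
--                         if file in message_text:
--                             extracted_files[row_key].append(file)
--     return extracted_files
-- ===== SOURCE B (Python) =====
-- def extract_mentioned_files(message_results, ground_truth_files):
--     # Two-phase per row: collect the message texts, memoize the matched-file
--     # list once per distinct text, then concatenate per text in prompt order.
--     result = {}
--     for row_key, prompts in message_results.items():
--         truth_files = ground_truth_files.get(row_key)
--         if truth_files is None:
--             result[row_key] = []
--             continue
--         texts = [pd['message_query'] for pd in prompts.values() if 'message_query' in pd]
--         matches = {}
--         for t in texts:
--             if t not in matches:
--                 matches[t] = [f for f in truth_files if f in t]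
--         result[row_key] = [f for t in texts for f in matches[t]]
--     return result
-- ===== Notes on version B (the rewrite author's own statement) =====
-- stated objective: alternative
-- what changed: Replaces A's triple-nested loop that appends file-by-file into the result dict with a two-phase per-row pipeline: collect the message texts, memoize the matched-file list once per distinct text in a dict, then concatenate those cached lists in prompt order.
import Mathlib
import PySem

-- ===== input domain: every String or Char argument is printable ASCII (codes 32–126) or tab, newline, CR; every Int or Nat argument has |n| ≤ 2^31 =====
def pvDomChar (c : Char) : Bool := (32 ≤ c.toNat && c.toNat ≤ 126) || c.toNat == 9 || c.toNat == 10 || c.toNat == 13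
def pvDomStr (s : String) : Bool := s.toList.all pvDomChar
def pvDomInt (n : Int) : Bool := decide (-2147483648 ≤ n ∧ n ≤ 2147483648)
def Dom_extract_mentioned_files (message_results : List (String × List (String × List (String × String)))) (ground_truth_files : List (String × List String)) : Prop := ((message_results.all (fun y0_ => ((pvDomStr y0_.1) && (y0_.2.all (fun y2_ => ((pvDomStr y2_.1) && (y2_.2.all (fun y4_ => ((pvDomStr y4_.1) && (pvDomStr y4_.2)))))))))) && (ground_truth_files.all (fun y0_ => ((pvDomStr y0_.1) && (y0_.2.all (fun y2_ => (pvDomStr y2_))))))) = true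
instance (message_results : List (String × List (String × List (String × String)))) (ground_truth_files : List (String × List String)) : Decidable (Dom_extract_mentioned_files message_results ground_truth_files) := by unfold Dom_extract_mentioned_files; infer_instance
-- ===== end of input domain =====

-- B replaces A's per-prompt rescan and dict self-append by a two-phase per-row pipeline
-- (collect texts, memoize the matched-file list per distinct text, concatenate): alternative
-- structure, same cost on inputs without repeated texts.

-- first-match lookup in an association list (the Python-dict convention for dict-typed inputs)
def pyFirst? {ν : Type} (l : List (String × ν)) (k : String) : Option ν :=
  (l.find? (fun p => p.1 == k)).map (·.2)

-- ===== PORT A =====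
-- 'for file in truth_files: if file in message_text: extracted_files[row_key].append(file)'
def emfA_fileLoop (rk message_text : String) (ef : PySem.Dict String (List String))
    (truth_files : List String) : PySem.Dict String (List String) :=
  truth_files.foldl
    (fun ef f => if PySem.Str.isIn f message_text then ef.insert rk (ef.getD rk [] ++ [f]) else ef) ef

-- 'for prompt_key, prompt_data in prompts.items(): if "message_query" in prompt_data: …'
def emfA_promptLoop (rk : String) (truth_files : List String)
    (ef : PySem.Dict String (List String)) (prompts : List (String × List (String × String))) :
    PySem.Dict String (List String) :=
  prompts.foldl
    (fun ef pp =>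
      match pyFirst? pp.2 "message_query" with
      | some message_text => emfA_fileLoop rk message_text ef truth_files
      | none => ef) ef

-- one iteration of 'for row_key, prompts in message_results.items()'
def emfA_row (gtf : List (String × List String)) (ef : PySem.Dict String (List String))
    (rp : String × List (String × List (String × String))) : PySem.Dict String (List String) :=
  let ef := ef.insert rp.1 []
  match pyFirst? gtf rp.1 with
  | some truth_files => emfA_promptLoop rp.1 truth_files ef rp.2
  | none => ef

def extract_mentioned_files (message_results : List (String × List (String × List (String × String)))) (ground_truth_files : List (String × List String)) : List (String × List String) :=
  (message_results.foldl (emfA_row ground_truth_files) PySem.Dict.empty).items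

-- ===== PORT B =====
-- '[f for f in truth_files if f in t]'
def emfB_match (truth_files : List String) (t : String) : List String :=
  truth_files.filter (fun f => PySem.Str.isIn f t)

-- 'for t in texts: if t not in matches: matches[t] = [f for f in truth_files if f in t]'
def emfB_cache (truth_files : List String) (texts : List String) :
    PySem.Dict String (List String) :=
  texts.foldl
    (fun m t => if m.contains t then m else m.insert t (emfB_match truth_files t))
    PySem.Dict.empty

-- one iteration of 'for row_key, prompts in message_results.items()' in B
def emfB_row (gtf : List (String × List String)) (res : PySem.Dict String (List String))
    (rp : String × List (String × List (String × String))) : PySem.Dict String (List String) :=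
  match pyFirst? gtf rp.1 with
  | none => res.insert rp.1 []
  | some truth_files =>
    let texts := rp.2.filterMap (fun pp => pyFirst? pp.2 "message_query")
    let mcache := emfB_cache truth_files texts
    res.insert rp.1 (texts.flatMap (fun t => mcache.getD t []))

def extract_mentioned_files_alt (message_results : List (String × List (String × List (String × String)))) (ground_truth_files : List (String × List String)) : List (String × List String) :=
  (message_results.foldl (emfB_row ground_truth_files) PySem.Dict.empty).items

-- ===== PRECONDITION & SPEC =====
def Spec_extract_mentioned_files (message_results : List (String × List (String × List (String × String)))) (ground_truth_files : List (String × List String)) (out : List (String × List String)) : Prop := out = extract_mentioned_files_alt message_results ground_truth_files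
instance (message_results : List (String × List (String × List (String × String)))) (ground_truth_files : List (String × List String)) (out : List (String × List String)) : Decidable (Spec_extract_mentioned_files message_results ground_truth_files out) := by unfold Spec_extract_mentioned_files; infer_instance

-- ===== CLAIM (what is proved, stated in full; the proofs are below) =====
def Claim_equal_extract_mentioned_files : Prop := ∀ (message_results : List (String × List (String × List (String × String)))) (ground_truth_files : List (String × List String)), Dom_extract_mentioned_files message_results ground_truth_files → Spec_extract_mentioned_files message_results ground_truth_files (extract_mentioned_files message_results ground_truth_files)

-- ===== LEMMAS AND PROOFS =====

-- A's innermost loop appends exactly the filtered files to the row entry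
lemma fileLoop_eq (rk text : String) (truth : List String) :
    ∀ (ef : PySem.Dict String (List String)) (l : List String),
      emfA_fileLoop rk text (ef.insert rk l) truth = ef.insert rk (l ++ emfB_match truth text) := by
  induction truth with
  | nil => intro ef l; simp [emfA_fileLoop, emfB_match]
  | cons f rest ih =>
    intro ef l
    simp only [emfA_fileLoop, List.foldl_cons] at *
    by_cases h : PySem.Str.isIn f text = true
    · rw [if_pos h, PySem.Dict.getD_insert_self, PySem.Dict.insert_insert_self, ih]
      simp only [emfB_match, List.filter_cons]
      rw [if_pos h]
      simp
    · rw [if_neg h, ih]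
      simp only [emfB_match, List.filter_cons]
      rw [if_neg h]

-- A's prompt loop appends the concatenation over the texts that carry a 'message_query'
lemma promptLoop_eq (rk : String) (truth : List String) :
    ∀ (prompts : List (String × List (String × String)))
      (ef : PySem.Dict String (List String)) (l : List String),
      emfA_promptLoop rk truth (ef.insert rk l) prompts
        = ef.insert rk
            (l ++ (prompts.filterMap (fun pp => pyFirst? pp.2 "message_query")).flatMap
              (emfB_match truth)) := by
  intro prompts
  induction prompts with
  | nil => intro ef l; simp [emfA_promptLoop]
  | cons pp rest ih =>
    intro ef l
    cases h : pyFirst? pp.2 "message_query" with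
    | some text =>
      have : emfA_promptLoop rk truth (ef.insert rk l) (pp :: rest)
          = emfA_promptLoop rk truth (emfA_fileLoop rk text (ef.insert rk l) truth) rest := by
        simp [emfA_promptLoop, h]
      rw [this, fileLoop_eq, ih]
      simp [h, List.append_assoc]
    | none =>
      have : emfA_promptLoop rk truth (ef.insert rk l) (pp :: rest)
          = emfA_promptLoop rk truth (ef.insert rk l) rest := by
        simp [emfA_promptLoop, h]
      rw [this, ih]
      simp [h]

-- membership in B's cache is monotone along the fold
lemma cache_mono (truth : List String) :
    ∀ (ts : List String) (m : PySem.Dict String (List String)) (x : String),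
      m.contains x = true →
      (ts.foldl (fun m t => if m.contains t then m else m.insert t (emfB_match truth t)) m).contains x
        = true := by
  intro ts
  induction ts with
  | nil => intro m x h; simpa using h
  | cons t rest ih =>
    intro m x h
    simp only [List.foldl_cons]
    by_cases hc : m.contains t = true
    · simp only [hc, if_true]; exact ih m x h
    · simp only [hc]
      exact ih _ x (by simp [PySem.Dict.contains_insert, h])

-- B's cache is correct on every key it holds, and holds every processed text
lemma cache_spec (truth : List String) :
    ∀ (ts : List String) (m : PySem.Dict String (List String)),
      (∀ t, m.contains t = true → m.getD t [] = emfB_match truth t) →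
      (∀ t, (ts.foldl (fun m t => if m.contains t then m else m.insert t (emfB_match truth t)) m).contains t = true →
        (ts.foldl (fun m t => if m.contains t then m else m.insert t (emfB_match truth t)) m).getD t []
          = emfB_match truth t)
      ∧ (∀ t ∈ ts,
        (ts.foldl (fun m t => if m.contains t then m else m.insert t (emfB_match truth t)) m).contains t = true) := by
  intro ts
  induction ts with
  | nil => intro m hm; exact ⟨by simpa using hm, by simp⟩
  | cons t rest ih =>
    intro m hm
    simp only [List.foldl_cons]
    by_cases hc : m.contains t = true
    · simp only [hc, if_true]
      refine ⟨(ih m hm).1, ?_⟩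
      intro t' ht'
      rcases List.mem_cons.mp ht' with rfl | ht'
      · exact cache_mono truth rest m t' hc
      · exact (ih m hm).2 t' ht'
    · simp only [hc]
      have hm' : ∀ t', (m.insert t (emfB_match truth t)).contains t' = true →
          (m.insert t (emfB_match truth t)).getD t' [] = emfB_match truth t' := by
        intro t' h'
        by_cases he : t' = t
        · subst he; simp [PySem.Dict.getD_insert_self]
        · rw [PySem.Dict.getD_insert, if_neg he]
          exact hm t' (by simpa [PySem.Dict.contains_insert, he] using h')
      refine ⟨(ih _ hm').1, ?_⟩
      intro t' ht'
      rcases List.mem_cons.mp ht' with rfl | ht'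
      · exact cache_mono truth rest _ t' (by simp [PySem.Dict.contains_insert_self])
      · exact (ih _ hm').2 t' ht'

lemma flatMap_congr_mem {α β : Type} (l : List α) (f g : α → List β)
    (h : ∀ a ∈ l, f a = g a) : l.flatMap f = l.flatMap g := by
  induction l with
  | nil => rfl
  | cons a rest ih =>
    simp only [List.flatMap_cons]
    rw [h a (by simp), ih (fun a ha => h a (List.mem_cons_of_mem _ ha))]

-- one row step of A equals one row step of B
lemma row_eq (gtf : List (String × List String)) (acc : PySem.Dict String (List String))
    (rp : String × List (String × List (String × String))) :
    emfA_row gtf acc rp = emfB_row gtf acc rp := by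
  cases h : pyFirst? gtf rp.1 with
  | none => simp [emfA_row, emfB_row, h]
  | some truth =>
    simp only [emfA_row, emfB_row, h]
    rw [promptLoop_eq]
    simp only [List.nil_append]
    have hspec := cache_spec truth (rp.2.filterMap (fun pp => pyFirst? pp.2 "message_query"))
      PySem.Dict.empty (by intro t ht; simp [PySem.Dict.contains_empty] at ht)
    have : (rp.2.filterMap (fun pp => pyFirst? pp.2 "message_query")).flatMap (emfB_match truth)
        = (rp.2.filterMap (fun pp => pyFirst? pp.2 "message_query")).flatMap
            (fun t => (emfB_cache truth (rp.2.filterMap (fun pp => pyFirst? pp.2 "message_query"))).getD t []) := by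
      apply flatMap_congr_mem
      intro t ht
      exact (hspec.1 t (hspec.2 t ht)).symm
    rw [this]

-- the whole folds agree
lemma fold_eq (gtf : List (String × List String)) :
    ∀ (mrs : List (String × List (String × List (String × String))))
      (acc : PySem.Dict String (List String)),
      mrs.foldl (emfA_row gtf) acc = mrs.foldl (emfB_row gtf) acc := by
  intro mrs
  induction mrs with
  | nil => intro acc; rfl
  | cons rp rest ih =>
    intro acc
    simp only [List.foldl_cons, row_eq]
    exact ih _

-- ===== VERDICT (by name: the statement is the Claim_ definition above) =====
theorem extract_mentioned_files_spec : Claim_equal_extract_mentioned_files := by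
  intro mrs gtf _
  unfold Spec_extract_mentioned_files extract_mentioned_files extract_mentioned_files_alt
  rw [fold_eq]
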